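-- pv_equiv track=rewrite | github.com/ottrp0p/sm-trance-ml | src/feature_processing/clean.py | create_measure_arrays
-- ===== SOURCE A (Python) =====
-- from typing import Dict, List, Any, Optional, Tuple
--
-- def create_measure_arrays(stepchart: List[str]) -> List[List[str]]:
--     """
--     Convert a stepchart array into an array of measure arrays.
--
--     Args:
--         stepchart: List of stepchart strings with commas as measure boundaries
--
--     Returns:
--         List of measure arrays, where each measure is a list of 4-character strings
--     """
--     measures = []
--     current_measure = []
--
--     for line in stepchart:
--         if line == ",":
--             # End of measure, add current measure to measures
--             if current_measure:  # Only add non-empty measures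
--                 measures.append(current_measure)
--             current_measure = []
--         else:
--             # Valid stepchart line, add to current measure
--             current_measure.append(line)
--
--     # Add the last measure if it exists
--     if current_measure:
--         measures.append(current_measure)
--
--     return measures
-- ===== SOURCE B (Python) =====
-- from itertools import groupby
--
-- def create_measure_arrays(stepchart):
--     return [list(group)
--             for is_comma, group in groupby(stepchart, key=lambda line: line == ",")
--             if not is_comma]
-- ===== Notes on version B (the rewrite author's own statement) =====
-- stated objective: idiomatic
-- what changed: Replaced the explicit accumulator-and-flush loop by itertools.groupby keyed on (line == ','), emitting each maximal run of non-comma lines as one measure.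
import Mathlib
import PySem

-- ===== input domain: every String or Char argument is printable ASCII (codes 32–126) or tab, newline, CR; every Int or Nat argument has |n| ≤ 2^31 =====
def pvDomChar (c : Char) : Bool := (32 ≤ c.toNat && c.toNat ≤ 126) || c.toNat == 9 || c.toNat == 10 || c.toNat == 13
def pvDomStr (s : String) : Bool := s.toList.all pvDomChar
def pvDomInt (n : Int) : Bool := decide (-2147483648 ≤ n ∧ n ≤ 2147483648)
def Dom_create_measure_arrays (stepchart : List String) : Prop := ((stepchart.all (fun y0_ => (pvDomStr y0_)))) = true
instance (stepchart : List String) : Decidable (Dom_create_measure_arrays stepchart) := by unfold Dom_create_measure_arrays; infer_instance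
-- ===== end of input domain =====

-- B replaces A's explicit accumulator-and-flush loop by run-grouping (itertools.groupby)
-- keyed on (line == ","), keeping the non-comma runs: more idiomatic, same O(n) cost.


-- ===== PORT A =====
-- one loop step: 'if line == ",": flush current measure (if non-empty) else append line'
def pvStepA (st : List (List String) × List String) (line : String) :
    List (List String) × List String :=
  if line == "," then
    (if st.2 ≠ [] then st.1 ++ [st.2] else st.1, [])
  else
    (st.1, st.2 ++ [line])

def create_measure_arrays (stepchart : List String) : List (List String) :=
  let st := stepchart.foldl pvStepA ([], [])
  if st.2 ≠ [] then st.1 ++ [st.2] else st.1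

-- ===== PORT B =====
-- transliteration of itertools.groupby: maximal runs of equal key (line == ",")
def pvRunsBy : List String → List (Bool × List String)
  | [] => []
  | x :: xs =>
    match pvRunsBy xs with
    | [] => [((x == ","), [x])]
    | (k, g) :: rest =>
      if (x == ",") = k then (k, x :: g) :: rest
      else ((x == ","), [x]) :: (k, g) :: rest

def create_measure_arrays_alt (stepchart : List String) : List (List String) :=
  (pvRunsBy stepchart).filterMap (fun kg => if kg.1 then none else some kg.2)

-- ===== PRECONDITION & SPEC =====
def Spec_create_measure_arrays (stepchart : List String) (out : List (List String)) : Prop := out = create_measure_arrays_alt stepchart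
instance (stepchart : List String) (out : List (List String)) : Decidable (Spec_create_measure_arrays stepchart out) := by unfold Spec_create_measure_arrays; infer_instance

-- ===== CLAIM (what is proved, stated in full; the proofs are below) =====
def Claim_equal_create_measure_arrays : Prop := ∀ (stepchart : List String), Dom_create_measure_arrays stepchart → Spec_create_measure_arrays stepchart (create_measure_arrays stepchart)

-- ===== LEMMAS AND PROOFS =====

def pvFlush (st : List (List String) × List String) : List (List String) :=
  if st.2 ≠ [] then st.1 ++ [st.2] else st.1

def pvAeval (xs cur : List String) : List (List String) :=
  pvFlush (xs.foldl pvStepA ([], cur))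

def pvFilt (runs : List (Bool × List String)) : List (List String) :=
  runs.filterMap (fun kg => if kg.1 then none else some kg.2)

def pvMerge (cur : List String) (runs : List (Bool × List String)) :
    List (Bool × List String) :=
  if cur = [] then runs else
    match runs with
    | (false, g) :: rest => (false, cur ++ g) :: rest
    | _ => (false, cur) :: runs

theorem pvL1 (xs : List String) : ∀ (ms : List (List String)) (cur : List String),
    pvFlush (xs.foldl pvStepA (ms, cur)) = ms ++ pvAeval xs cur := by
  induction xs with
  | nil =>
    intro ms cur
    simp only [pvAeval, List.foldl, pvFlush]
    split <;> simp
  | cons x xs ih =>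
    intro ms cur
    simp only [pvAeval, List.foldl, pvStepA]
    by_cases hx : x = ","
    · simp only [hx, beq_self_eq_true, if_true]
      rw [ih, ih]
      by_cases hc : cur = [] <;> simp [hc]
    · have hb : (x == ",") = false := by simp [hx]
      simp only [hb, Bool.false_eq_true, if_false]
      rw [ih, ih]
      simp

theorem pvHeadKey (x : String) (xs : List String) :
    ∃ g rest, pvRunsBy (x :: xs) = ((x == ","), g) :: rest := by
  simp only [pvRunsBy]
  cases h : pvRunsBy xs with
  | nil => exact ⟨[x], [], rfl⟩
  | cons p rest =>
    obtain ⟨k, g⟩ := p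
    by_cases hk : (x == ",") = k
    · subst hk; simp
    · simp [hk]

theorem pvFilt_comma (xs : List String) :
    pvFilt (pvRunsBy ("," :: xs)) = pvFilt (pvRunsBy xs) := by
  simp only [pvRunsBy]
  cases h : pvRunsBy xs with
  | nil => simp [pvFilt]
  | cons p rest =>
    obtain ⟨k, g⟩ := p
    cases k <;> simp [pvFilt]

theorem pvL3 (x : String) (xs : List String) (cur : List String) (hx : x ≠ ",") :
    pvMerge cur (pvRunsBy (x :: xs)) = pvMerge (cur ++ [x]) (pvRunsBy xs) := by
  have hb : (x == ",") = false := by simp [hx]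
  simp only [pvRunsBy, hb]
  cases h : pvRunsBy xs with
  | nil =>
    by_cases hc : cur = [] <;> simp [pvMerge, hc]
  | cons p rest =>
    obtain ⟨k, g⟩ := p
    cases k with
    | false =>
      by_cases hc : cur = [] <;> simp [pvMerge, hc]
    | true =>
      by_cases hc : cur = [] <;> simp [pvMerge, hc]

theorem pvL2 (xs : List String) : ∀ (cur : List String),
    pvAeval xs cur = pvFilt (pvMerge cur (pvRunsBy xs)) := by
  induction xs with
  | nil =>
    intro cur
    by_cases hc : cur = [] <;>
      simp [pvAeval, pvFlush, pvRunsBy, pvMerge, pvFilt, hc]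
  | cons x xs ih =>
    intro cur
    by_cases hx : x = ","
    · subst hx
      have lhs : pvAeval ("," :: xs) cur
          = (if cur ≠ [] then [cur] else []) ++ pvAeval xs [] := by
        simp only [pvAeval, List.foldl, pvStepA, beq_self_eq_true, if_true]
        rw [pvL1]
        by_cases hc : cur = [] <;> simp [hc, pvAeval]
      rw [lhs, ih]
      have hmerge0 : pvMerge [] (pvRunsBy xs) = pvRunsBy xs := by simp [pvMerge]
      rw [hmerge0]
      obtain ⟨g, rest, hg⟩ := pvHeadKey "," xs
      simp only [beq_self_eq_true] at hg
      by_cases hc : cur = []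
      · simp [hc, pvMerge, ← pvFilt_comma xs]
      · have : pvMerge cur (pvRunsBy ("," :: xs)) = (false, cur) :: pvRunsBy ("," :: xs) := by
          rw [hg]; simp [pvMerge, hc]
        rw [this]
        simp only [pvFilt, List.filterMap]
        have := pvFilt_comma xs
        simp only [pvFilt] at this
        simp [this, hc]
    · have lhs : pvAeval (x :: xs) cur = pvAeval xs (cur ++ [x]) := by
        have hb : (x == ",") = false := by simp [hx]
        simp [pvAeval, List.foldl, pvStepA, hb]
      rw [lhs, ih, pvL3 x xs cur hx]

-- ===== VERDICT (by name: the statement is the Claim_ definition above) =====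
theorem create_measure_arrays_spec : Claim_equal_create_measure_arrays := by
  intro stepchart _
  show create_measure_arrays stepchart = create_measure_arrays_alt stepchart
  have h1 : create_measure_arrays stepchart = pvAeval stepchart [] := rfl
  rw [h1, pvL2]
  simp [pvMerge, create_measure_arrays_alt, pvFilt]
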